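-- pv_equiv track=rewrite | github.com/TEX479/QED | QED_system.py | _chunks2int
-- ===== SOURCE A (Python) =====
-- def _chunks2int(text_list:list[int], text_length:int, chunk:int):
--     text:int = 0
--     for i in range(len(text_list)-1):
--         text = text + text_list[i]
--         text = text << chunk
--     text = text >> (len(text_list * chunk) - text_length)
--     text += text_list[-1]
--     return text
-- ===== SOURCE B (Python) =====
-- def _chunks2int(text_list: list[int], text_length: int, chunk: int):
--     # Balanced pairwise merge of the shifted chunks, then one final shift and add.
--     prefix = text_list[:-1]
--
--     def merge(lo: int, hi: int) -> int:
--         # integer value of prefix[lo:hi], entry k weighted by 2**(chunk*(hi-1-k))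
--         if hi - lo <= 1:
--             return prefix[lo] if hi - lo == 1 else 0
--         mid = (lo + hi) // 2
--         return (merge(lo, mid) << (chunk * (hi - mid))) + merge(mid, hi)
--
--     acc = (merge(0, len(prefix)) << chunk) if prefix else 0
--     return (acc >> (len(text_list) * chunk - text_length)) + text_list[-1]
-- ===== Notes on version B (the rewrite author's own statement) =====
-- stated objective: faster
-- what changed: Replaces the left-to-right Horner loop (one shift+add of the ever-growing accumulator per chunk) by a balanced divide-and-conquer merge of the chunks with a single final shift and add; Pre_ excludes negative chunk widths and negative final shift amounts, where A's value rests on the accidental list-repetition 'len(text_list * chunk)' or A raises.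
-- outside the precondition, e.g. on _chunks2int([5], 0, -1): A returns 5, B raises ValueError
import Mathlib
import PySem

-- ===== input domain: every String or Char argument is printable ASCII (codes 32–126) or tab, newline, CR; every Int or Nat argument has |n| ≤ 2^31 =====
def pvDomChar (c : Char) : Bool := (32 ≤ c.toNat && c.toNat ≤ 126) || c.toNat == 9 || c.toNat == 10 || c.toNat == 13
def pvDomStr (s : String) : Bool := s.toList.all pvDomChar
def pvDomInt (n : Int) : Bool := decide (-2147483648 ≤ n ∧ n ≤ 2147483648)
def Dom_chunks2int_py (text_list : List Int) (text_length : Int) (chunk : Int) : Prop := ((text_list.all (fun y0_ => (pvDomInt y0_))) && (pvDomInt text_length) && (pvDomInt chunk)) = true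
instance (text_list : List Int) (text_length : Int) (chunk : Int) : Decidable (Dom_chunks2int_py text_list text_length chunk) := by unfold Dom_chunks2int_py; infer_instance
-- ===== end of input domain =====

-- B replaces A's Horner loop by a balanced divide-and-conquer merge of the chunks (faster: fewer big-int bit operations).

-- ===== PORT A =====
-- the loop 'for i in range(len(text_list)-1)' reads text_list[0..n-2] in order, i.e. folds over text_list[:-1];
-- 'x << chunk' = x * 2^chunk (chunk ≥ 0 inside Pre_), 'x >> k' = floor-division by 2^k,
-- 'len(text_list * chunk)' = n * max(chunk,0), 'text_list[-1]' via PySem.List.pyGet? (nonempty inside Pre_).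
def chunks2int_py (text_list : List Int) (text_length : Int) (chunk : Int) : Int :=
  let text : Int := (text_list.dropLast).foldl (fun t a => (t + a) * 2 ^ chunk.toNat) 0
  let text : Int := PySem.Int.floordiv text (2 ^ (((text_list.length : Int) * max chunk 0) - text_length).toNat)
  text + (PySem.List.pyGet? text_list (-1)).getD 0

-- ===== PORT B =====
-- Source B's merge(lo,hi) on prefix[lo:hi]; ported on the sublist itself, splitAt (len/2) = the (lo+hi)//2 midpoint split
def pvMerge (c : Int) (l : List Int) : Int :=
  if h : l.length ≤ 1 then l.headD 0
  else
    let lft := l.take (l.length / 2)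
    let rgt := l.drop (l.length / 2)
    pvMerge c lft * 2 ^ (c.toNat * rgt.length) + pvMerge c rgt
termination_by l.length
decreasing_by
  · simp only [List.length_take]; omega
  · simp only [List.length_drop]; omega

def chunks2int_py_alt (text_list : List Int) (text_length : Int) (chunk : Int) : Int :=
  let pre := text_list.dropLast   -- text_list[:-1]
  let acc : Int := if pre.isEmpty then 0 else pvMerge chunk pre * 2 ^ chunk.toNat
  PySem.Int.floordiv acc (2 ^ (((text_list.length : Int) * chunk) - text_length).toNat)
    + (PySem.List.pyGet? text_list (-1)).getD 0

-- ===== PRECONDITION & SPEC =====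
-- Pre_ excludes the empty list (A's text_list[-1] raises IndexError), negative chunk widths (A raises
-- on '<< chunk' whenever the loop runs, and on a one-element list A's surviving value rests on the
-- accidental list-repetition 'len(text_list * chunk)' evaluating to 0), and negative final shift
-- amounts (A's '>>' raises ValueError).
def Pre_chunks2int_py (text_list : List Int) (text_length : Int) (chunk : Int) : Prop :=
  text_list ≠ [] ∧ 0 ≤ chunk ∧ 0 ≤ (text_list.length : Int) * chunk - text_length
instance (text_list : List Int) (text_length : Int) (chunk : Int) : Decidable (Pre_chunks2int_py text_list text_length chunk) := by unfold Pre_chunks2int_py; infer_instance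
def pvWitness_chunks2int_py : List Int × Int × Int := ([1, 2], 16, 8)

def Spec_chunks2int_py (text_list : List Int) (text_length : Int) (chunk : Int) (out : Int) : Prop := out = chunks2int_py_alt text_list text_length chunk
instance (text_list : List Int) (text_length : Int) (chunk : Int) (out : Int) : Decidable (Spec_chunks2int_py text_list text_length chunk out) := by unfold Spec_chunks2int_py; infer_instance

-- ===== CLAIM (what is proved, stated in full; the proofs are below) =====
def Claim_equal_chunks2int_py : Prop := ∀ (text_list : List Int) (text_length : Int) (chunk : Int), Dom_chunks2int_py text_list text_length chunk → Pre_chunks2int_py text_list text_length chunk → Spec_chunks2int_py text_list text_length chunk (chunks2int_py text_list text_length chunk)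

-- ===== LEMMAS AND PROOFS =====

-- place-value sum: pvS W l = Σ l[k] * W^(len-1-k)
def pvS (W : Int) : List Int → Int
  | [] => 0
  | a :: l => a * W ^ l.length + pvS W l

theorem pvS_append (W : Int) (l1 l2 : List Int) :
    pvS W (l1 ++ l2) = pvS W l1 * W ^ l2.length + pvS W l2 := by
  induction l1 with
  | nil => simp [pvS]
  | cons a l ih =>
    simp only [List.cons_append, pvS, List.length_append, ih]
    ring

theorem pvMerge_eq_pvS (c : Int) (l : List Int) : pvMerge c l = pvS (2 ^ c.toNat) l := by
  induction l using pvMerge.induct with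
  | case1 l h =>
    rw [pvMerge]; simp only [h, dite_true]
    match l, h with
    | [], _ => simp [pvS]
    | [a], _ => simp [pvS]
  | case2 l h lft rgt ih1 ih2 =>
    rw [pvMerge]; simp only [h, dite_false]
    rw [ih1, ih2]
    have := pvS_append (2 ^ c.toNat) (l.take (l.length / 2)) (l.drop (l.length / 2))
    simp only [List.take_append_drop] at this
    rw [this, ← pow_mul]

-- A's loop invariant: fold with step (t+a)*W from t equals t*W^len + pvS l * W
theorem foldA_eq (W : Int) (l : List Int) (t : Int) :
    l.foldl (fun t a => (t + a) * W) t = t * W ^ l.length + pvS W l * W := by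
  induction l generalizing t with
  | nil => simp [pvS]
  | cons a l ih =>
    simp only [List.foldl_cons, pvS, ih, List.length_cons, pow_succ]
    ring

theorem ports_eq (text_list : List Int) (text_length chunk : Int) (hc : 0 ≤ chunk) :
    chunks2int_py text_list text_length chunk = chunks2int_py_alt text_list text_length chunk := by
  unfold chunks2int_py chunks2int_py_alt
  have hmax : max chunk 0 = chunk := max_eq_left hc
  rw [hmax]
  have h1 : (text_list.dropLast).foldl (fun t a => (t + a) * 2 ^ chunk.toNat) 0
      = (if (text_list.dropLast).isEmpty then 0
         else pvMerge chunk (text_list.dropLast) * 2 ^ chunk.toNat) := by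
    rw [foldA_eq, pvMerge_eq_pvS]
    cases hd : text_list.dropLast with
    | nil => simp [pvS]
    | cons a l => simp
  rw [h1]

-- ===== VERDICT (by name: the statement is the Claim_ definition above) =====
theorem chunks2int_py_spec : Claim_equal_chunks2int_py := by
  intro tl L c _ hp
  unfold Spec_chunks2int_py
  exact ports_eq tl L c hp.2.1
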